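-- pv_equiv track=rewrite | github.com/mikesvoboda/nemotron-v3-home-security-intelligence | scripts/benchmark_py314.py | benchmark_cpu_serial
-- ===== SOURCE A (Python) =====
-- def benchmark_cpu_serial(work_size: int = 1000000, iterations: int = 4) -> list[int]:
--     """Benchmark CPU-bound work serially for comparison.
--
--     Args:
--         work_size: Amount of work per iteration
--         iterations: Number of serial iterations
--
--     Returns:
--         List of results
--     """
--     results: list[int] = []
--     for _ in range(iterations):
--         total = 0
--         for i in range(work_size):
--             total += i * i % 1000
--         results.append(total)
--     return results
-- ===== SOURCE B (Python) =====
-- def benchmark_cpu_serial(work_size: int = 1000000, iterations: int = 4) -> list[int]: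
--     """Same results as the serial benchmark, via periodicity of i*i % 1000."""
--     n = max(work_size, 0)
--     period = [i * i % 1000 for i in range(1000)]
--     q, r = divmod(n, 1000)
--     total = q * sum(period) + sum(period[:r])
--     return [total] * iterations
-- ===== Notes on version B (the rewrite author's own statement) =====
-- stated objective: faster
-- what changed: B computes the per-iteration total once in closed form from one period of i*i % 1000 (q*period_sum + prefix) and replicates it, instead of re-running the O(work_size) inner loop for every iteration.
import Mathlib
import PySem

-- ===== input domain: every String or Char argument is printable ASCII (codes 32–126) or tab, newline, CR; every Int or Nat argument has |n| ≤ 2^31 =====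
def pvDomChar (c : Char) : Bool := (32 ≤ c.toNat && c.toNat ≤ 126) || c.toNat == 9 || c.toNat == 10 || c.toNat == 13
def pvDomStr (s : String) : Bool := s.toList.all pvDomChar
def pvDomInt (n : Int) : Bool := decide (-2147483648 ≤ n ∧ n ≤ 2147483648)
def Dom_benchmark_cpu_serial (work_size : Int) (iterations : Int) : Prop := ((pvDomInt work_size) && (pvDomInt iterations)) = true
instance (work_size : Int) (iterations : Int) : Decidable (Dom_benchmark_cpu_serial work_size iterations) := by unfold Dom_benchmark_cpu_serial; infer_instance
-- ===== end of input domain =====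

-- B computes the single per-iteration total in closed form from one period of i*i % 1000 and replicates it (faster: O(1000+iterations) vs O(iterations*work_size)).

-- ===== PORT A =====
def benchmark_cpu_serial (work_size : Int) (iterations : Int) : List Int :=
  (PySem.List.pyRange 0 iterations 1).foldl
    (fun results _ =>
      results ++ [(PySem.List.pyRange 0 work_size 1).foldl
        (fun total i => total + PySem.Int.mod (i * i) 1000) 0])
    []

-- ===== PORT B =====
def benchmark_cpu_serial_alt (work_size : Int) (iterations : Int) : List Int :=
  let n := max work_size 0
  let period := (PySem.List.pyRange 0 1000 1).map (fun i => PySem.Int.mod (i * i) 1000)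
  let q := PySem.Int.floordiv n 1000
  let r := PySem.Int.mod n 1000
  let total := q * period.sum + (PySem.List.slice period none (some r)).sum
  List.replicate iterations.toNat total

-- ===== PRECONDITION & SPEC =====
def Spec_benchmark_cpu_serial (work_size : Int) (iterations : Int) (out : List Int) : Prop := out = benchmark_cpu_serial_alt work_size iterations
instance (work_size : Int) (iterations : Int) (out : List Int) : Decidable (Spec_benchmark_cpu_serial work_size iterations out) := by unfold Spec_benchmark_cpu_serial; infer_instance

-- ===== CLAIM (what is proved, stated in full; the proofs are below) =====
def Claim_equal_benchmark_cpu_serial : Prop := ∀ (work_size : Int) (iterations : Int), Dom_benchmark_cpu_serial work_size iterations → Spec_benchmark_cpu_serial work_size iterations (benchmark_cpu_serial work_size iterations)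

-- ===== LEMMAS AND PROOFS =====

-- Nat-level sum of i*i % 1000 over range k
def pvG (k : Nat) : Nat := ∑ i ∈ Finset.range k, i * i % 1000

theorem pvG_succ (k : Nat) : pvG (k + 1) = pvG k + k * k % 1000 := by
  simp [pvG, Finset.sum_range_succ]

theorem pv_hper (m : Nat) : (m + 1000) * (m + 1000) % 1000 = m * m % 1000 := by
  have h : (m + 1000) * (m + 1000) = m * m + 1000 * (2 * m + 1000) := by ring
  rw [h, Nat.add_mul_mod_self_left]

theorem pv_sum_range_add (f : Nat → Nat) (t c : Nat) :
    ∑ i ∈ Finset.range (t + c), f i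
      = (∑ i ∈ Finset.range t, f i) + ∑ j ∈ Finset.range c, f (t + j) := by
  induction c with
  | zero => simp
  | succ c ih =>
      rw [show t + (c + 1) = (t + c) + 1 by omega, Finset.sum_range_succ,
        Finset.sum_range_succ, ih]
      omega

theorem pv_window (m : Nat) :
    (∑ j ∈ Finset.range 1000, (m + j) * (m + j) % 1000) = pvG 1000 := by
  induction m with
  | zero => simp [pvG]
  | succ m ih =>
      have hA : (∑ j ∈ Finset.range 1001, (m + j) * (m + j) % 1000)
          = (∑ j ∈ Finset.range 1000, (m + j) * (m + j) % 1000)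
            + (m + 1000) * (m + 1000) % 1000 := by
        rw [Finset.sum_range_succ]
      have hB : (∑ j ∈ Finset.range 1001, (m + j) * (m + j) % 1000)
          = (∑ j ∈ Finset.range 1000, (m + (j + 1)) * (m + (j + 1)) % 1000)
            + (m + 0) * (m + 0) % 1000 := by
        rw [show (1001 : Nat) = 1000 + 1 from rfl, Finset.sum_range_succ']
      have hshift : (∑ j ∈ Finset.range 1000, (m + 1 + j) * (m + 1 + j) % 1000)
          = ∑ j ∈ Finset.range 1000, (m + (j + 1)) * (m + (j + 1)) % 1000 := by
        apply Finset.sum_congr rfl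
        intro j _
        rw [show m + 1 + j = m + (j + 1) by omega]
      simp only [Nat.add_zero] at hB
      rw [hshift]
      have := pv_hper m
      omega

theorem pvG_add_1000 (t : Nat) : pvG (t + 1000) = pvG t + pvG 1000 := by
  have h := pv_sum_range_add (fun i => i * i % 1000) t 1000
  simpa [pvG, pv_window t] using h

theorem pvG_split (a b : Nat) : pvG (1000 * a + b) = a * pvG 1000 + pvG b := by
  induction a with
  | zero => simp
  | succ a ih =>
      rw [show 1000 * (a + 1) + b = (1000 * a + b) + 1000 by omega,
        pvG_add_1000, ih]
      ring

-- A's inner loop computes pvG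
theorem pv_inner_eq (w : Nat) :
    (PySem.List.pyRange 0 (w : Int) 1).foldl
      (fun total i => total + PySem.Int.mod (i * i) 1000) 0 = (pvG w : Int) := by
  induction w with
  | zero => simp [PySem.List.pyRange_one_eq_nil, pvG]
  | succ w ih =>
      rw [show ((w + 1 : Nat) : Int) = (w : Int) + 1 by push_cast; ring,
        PySem.List.pyRange_one_succ_right (by positivity), List.foldl_append]
      simp only [List.foldl_cons, List.foldl_nil, ih, pvG_succ]
      have : PySem.Int.mod ((w : Int) * (w : Int)) 1000 = ((w * w % 1000 : Nat) : Int) := by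
        exact_mod_cast PySem.Int.mod_natCast (w * w) 1000
      rw [this]
      push_cast
      ring

-- B's period list summed is pvG
theorem pv_period_sum_eq (w : Nat) :
    ((PySem.List.pyRange 0 (w : Int) 1).map (fun i => PySem.Int.mod (i * i) 1000)).sum
      = (pvG w : Int) := by
  induction w with
  | zero => simp [PySem.List.pyRange_one_eq_nil, pvG]
  | succ w ih =>
      rw [show ((w + 1 : Nat) : Int) = (w : Int) + 1 by push_cast; ring,
        PySem.List.pyRange_one_succ_right (by positivity), List.map_append, List.sum_append]
      simp only [List.map_cons, List.map_nil, List.sum_cons, List.sum_nil, ih, pvG_succ]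
      have : PySem.Int.mod ((w : Int) * (w : Int)) 1000 = ((w * w % 1000 : Nat) : Int) := by
        exact_mod_cast PySem.Int.mod_natCast (w * w) 1000
      rw [this]
      push_cast
      ring

-- a prefix of the period list is a smaller range's map
theorem pv_period_take (k : Nat) (hk : k ≤ 1000) :
    ((PySem.List.pyRange 0 (1000 : Int) 1).map (fun i => PySem.Int.mod (i * i) 1000)).take k
      = (PySem.List.pyRange 0 (k : Int) 1).map (fun i => PySem.Int.mod (i * i) 1000) := by
  rw [← List.map_take]
  congr 1
  rw [PySem.List.pyRange_one_append 0 (k : Int) 1000 (by positivity) (by exact_mod_cast hk)]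
  rw [List.take_append_of_le_length (by simp [PySem.List.length_pyRange_one])]
  rw [List.take_of_length_le (by simp [PySem.List.length_pyRange_one])]

-- the two per-iteration totals agree
theorem pv_total_eq (work_size : Int) :
    (PySem.List.pyRange 0 work_size 1).foldl
      (fun total i => total + PySem.Int.mod (i * i) 1000) 0
    = PySem.Int.floordiv (max work_size 0) 1000
        * ((PySem.List.pyRange 0 1000 1).map (fun i => PySem.Int.mod (i * i) 1000)).sum
      + (PySem.List.slice
          ((PySem.List.pyRange 0 1000 1).map (fun i => PySem.Int.mod (i * i) 1000))
          none (some (PySem.Int.mod (max work_size 0) 1000))).sum := by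
  set period := (PySem.List.pyRange 0 1000 1).map (fun i => PySem.Int.mod (i * i) 1000) with hperiod
  obtain ⟨w, hw⟩ : ∃ w : Nat, max work_size 0 = (w : Int) :=
    ⟨(max work_size 0).toNat, by omega⟩
  have hfold : (PySem.List.pyRange 0 work_size 1).foldl
      (fun total i => total + PySem.Int.mod (i * i) 1000) 0 = (pvG w : Int) := by
    by_cases h : work_size ≤ 0
    · have hw0 : w = 0 := by omega
      rw [PySem.List.pyRange_one_eq_nil h]
      simp [hw0, pvG]
    · have : work_size = (w : Int) := by omega
      rw [this]; exact pv_inner_eq w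
  rw [hfold, hw]
  have hq : PySem.Int.floordiv ((w : Int)) 1000 = ((w / 1000 : Nat) : Int) :=
    PySem.Int.floordiv_natCast w 1000
  have hr : PySem.Int.mod ((w : Int)) 1000 = ((w % 1000 : Nat) : Int) :=
    PySem.Int.mod_natCast w 1000
  rw [hq, hr]
  have hS : period.sum = (pvG 1000 : Int) := by
    rw [hperiod]
    exact_mod_cast pv_period_sum_eq 1000
  have hslice : (PySem.List.slice period none (some ((w % 1000 : Nat) : Int))).sum
      = (pvG (w % 1000) : Int) := by
    rw [PySem.List.slice_to_natCast, hperiod,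
      pv_period_take (w % 1000) (by omega)]
    exact pv_period_sum_eq (w % 1000)
  rw [hS, hslice]
  have := pvG_split (w / 1000) (w % 1000)
  rw [show 1000 * (w / 1000) + w % 1000 = w by omega] at this
  rw [this]
  push_cast
  ring

-- fold that only appends a constant builds a replicate
theorem pv_foldl_append_replicate {α : Type} (c : Int) (l : List α) (acc : List Int) :
    l.foldl (fun rs _ => rs ++ [c]) acc = acc ++ List.replicate l.length c := by
  induction l generalizing acc with
  | nil => simp
  | cons x xs ih =>
      rw [List.foldl_cons, ih, List.length_cons, List.replicate_succ]
      simp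

-- ===== VERDICT (by name: the statement is the Claim_ definition above) =====
theorem benchmark_cpu_serial_spec : Claim_equal_benchmark_cpu_serial := by
  intro work_size iterations _
  unfold Spec_benchmark_cpu_serial benchmark_cpu_serial benchmark_cpu_serial_alt
  rw [pv_foldl_append_replicate]
  rw [PySem.List.length_pyRange_one]
  rw [pv_total_eq work_size]
  simp only [Int.sub_zero, List.nil_append]
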